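-- pv_equiv track=rewrite | github.com/shivarao101/basicdsplibrary | build/lib/basicdsplibrary/__init__.py | diff_eqn
-- ===== SOURCE A (Python) =====
-- def diff_eqn(b,a,x):
--     N=len(x)
--     a1=[0]*(N)
--     b1=[0]*(N)
--     y=[0]*(N)
--     if(len(a)==1):
--         for i in range(len(b)):
--             b1[i]=b[i]
--         for n in range(N):
--             for k in range(n+1):
--                 y[n]=y[n]+b1[k]*x[n-k]
--         return y
--     else:
--         for i in range(len(a)):
--             a1[i]=a[i]
--         for i in range(len(b)):
--             b1[i]=b[i]
--         for n in range(N):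
--             term1=0
--             term2=0
--             for k in range(n+1):
--                 term1=term1-a1[k]*y[n-k]
--                 term2=term2+b1[k]*x[n-k]
--                 y[n]=term1+term2
--     return y
-- ===== SOURCE B (Python) =====
-- def diff_eqn(b, a, x):
--     N = len(x)
--     # feedforward pass: pure convolution of b with x
--     v = [sum(b[k] * x[n - k] for k in range(min(n + 1, len(b)))) for n in range(N)]
--     if len(a) == 1:
--         return v
--     # feedback pass: sequential recurrence (a[0] is never used, matching A)
--     y = []
--     for n in range(N):
--         y.append(v[n] - sum(a[k] * y[n - k] for k in range(1, min(n + 1, len(a)))))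
--     return y
-- ===== Notes on version B (the rewrite author's own statement) =====
-- stated objective: simpler
-- what changed: A pads b and a to length N and runs one interleaved double loop updating y[n] in place with two running terms; B splits the filter into two plain passes: a feedforward convolution list v built by a comprehension, then (IIR case only) a sequential feedback recurrence appending y[n]=v[n]-sum(a[k]*y[n-k], k>=1), with no padded buffers and no in-place updates.
import Mathlib
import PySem

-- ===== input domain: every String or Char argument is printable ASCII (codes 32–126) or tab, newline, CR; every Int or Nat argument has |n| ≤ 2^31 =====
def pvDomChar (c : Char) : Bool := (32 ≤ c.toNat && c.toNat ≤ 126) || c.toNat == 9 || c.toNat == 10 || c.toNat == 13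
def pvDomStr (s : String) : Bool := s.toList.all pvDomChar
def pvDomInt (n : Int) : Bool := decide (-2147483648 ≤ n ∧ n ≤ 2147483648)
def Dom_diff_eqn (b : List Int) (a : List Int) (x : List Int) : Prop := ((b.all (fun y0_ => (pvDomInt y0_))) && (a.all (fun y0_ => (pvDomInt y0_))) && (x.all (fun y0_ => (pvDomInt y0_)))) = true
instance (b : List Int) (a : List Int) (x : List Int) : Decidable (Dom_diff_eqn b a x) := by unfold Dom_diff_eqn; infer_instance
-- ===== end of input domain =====

-- B replaces A's padded buffers and single interleaved in-place double loop by two plain passes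
-- (a feedforward convolution list, then a sequential feedback recurrence): simpler decomposition, same cost.


-- ===== PORT A =====
-- Literal transliteration of A: zero buffers a1/b1/y of length N, copy loops (in-range under
-- Pre_, where Python does not raise), then the interleaved double loop updating y[n] in place.
def diff_eqn (b : List Int) (a : List Int) (x : List Int) : List Int :=
  let N := x.length
  let a1 : List Int := List.replicate N 0
  let b1 : List Int := List.replicate N 0
  let y : List Int := List.replicate N 0
  if a.length = 1 then
    let b1 := (List.range b.length).foldl (fun bl i => bl.set i (b.getD i 0)) b1
    (List.range N).foldl (fun y n =>
      (List.range (n+1)).foldl (fun y k =>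
        y.set n (y.getD n 0 + b1.getD k 0 * x.getD (n-k) 0)) y) y
  else
    let a1 := (List.range a.length).foldl (fun al i => al.set i (a.getD i 0)) a1
    let b1 := (List.range b.length).foldl (fun bl i => bl.set i (b.getD i 0)) b1
    (List.range N).foldl (fun y n =>
      ((List.range (n+1)).foldl (fun (st : Int × Int × List Int) k =>
        let t1 := st.1 - a1.getD k 0 * st.2.2.getD (n-k) 0
        let t2 := st.2.1 + b1.getD k 0 * x.getD (n-k) 0
        (t1, t2, st.2.2.set n (t1 + t2))) ((0:Int), (0:Int), y)).2.2) y

-- ===== PORT B =====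
-- Transliteration of Source B: feedforward list v by a map, then the feedback recurrence by append.
def diff_eqn_alt (b : List Int) (a : List Int) (x : List Int) : List Int :=
  let N := x.length
  let v := (List.range N).map (fun n =>
    (List.range (min (n+1) b.length)).foldl (fun s k => s + b.getD k 0 * x.getD (n-k) 0) 0)
  if a.length = 1 then v
  else
    (List.range N).foldl (fun y n =>
      y ++ [v.getD n 0 - (List.range' 1 (min (n+1) a.length - 1)).foldl
              (fun s k => s + a.getD k 0 * y.getD (n-k) 0) 0]) []

-- ===== PRECONDITION & SPEC =====
-- Pre_ excludes exactly the inputs where A raises IndexError: the copy loops write b (and, when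
-- len(a) ≠ 1, a) into buffers of length len(x), so over-long coefficient lists overflow.
def Pre_diff_eqn (b : List Int) (a : List Int) (x : List Int) : Prop :=
  b.length ≤ x.length ∧ (a.length = 1 ∨ a.length ≤ x.length)
instance (b : List Int) (a : List Int) (x : List Int) : Decidable (Pre_diff_eqn b a x) := by unfold Pre_diff_eqn; infer_instance
def pvWitness_diff_eqn : List Int × List Int × List Int := ([1, 2], [1, -1], [3, 4, 5])

def Spec_diff_eqn (b : List Int) (a : List Int) (x : List Int) (out : List Int) : Prop := out = diff_eqn_alt b a x
instance (b : List Int) (a : List Int) (x : List Int) (out : List Int) : Decidable (Spec_diff_eqn b a x out) := by unfold Spec_diff_eqn; infer_instance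

-- ===== CLAIM (what is proved, stated in full; the proofs are below) =====
def Claim_equal_diff_eqn : Prop := ∀ (b : List Int) (a : List Int) (x : List Int), Dom_diff_eqn b a x → Pre_diff_eqn b a x → Spec_diff_eqn b a x (diff_eqn b a x)

-- ===== LEMMAS AND PROOFS =====

-- the exact feedforward sum and the reference recurrence both programs compute
def fB (b x : List Int) (n : Nat) : Int := ∑ k ∈ Finset.range (n+1), b.getD k 0 * x.getD (n-k) 0

def yref (a b x : List Int) : Nat → List Int
  | 0 => []
  | n+1 => yref a b x n ++
      [fB b x n - ∑ k ∈ Finset.Ico 1 (n+1), a.getD k 0 * (yref a b x n).getD (n-k) 0]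

lemma yref_length (a b x : List Int) (n : Nat) : (yref a b x n).length = n := by
  induction n with
  | zero => rfl
  | succ n ih => simp [yref, ih]

lemma padded_getD (l : List Int) (m k : Nat) :
    (l ++ List.replicate m 0).getD k 0 = l.getD k 0 := by
  by_cases h : k < l.length
  · exact List.getD_append l _ 0 k h
  · rw [List.getD_eq_default _ _ (le_of_not_gt h)]
    by_cases h2 : k < l.length + m
    · rw [List.getD_append_right _ _ _ _ (le_of_not_gt h)]
      simp
    · rw [List.getD_eq_default]
      simpa using le_of_not_gt h2

lemma copy_fold (src : List Int) (N : Nat) (h : src.length ≤ N) :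
    (List.range src.length).foldl (fun l i => l.set i (src.getD i 0)) (List.replicate N 0)
      = src ++ List.replicate (N - src.length) 0 := by
  suffices H : ∀ L, L ≤ src.length → L ≤ N →
      (List.range L).foldl (fun l i => l.set i (src.getD i 0)) (List.replicate N 0)
        = src.take L ++ List.replicate (N - L) 0 by
    simpa using H src.length le_rfl h
  intro L hL hLN
  induction L with
  | zero => simp
  | succ L ih =>
    rw [List.range_succ, List.foldl_append, ih (by omega) (by omega)]
    have hrep : List.replicate (N - L) (0:Int) = 0 :: List.replicate (N - (L+1)) 0 := by
      have : N - L = (N - (L+1)) + 1 := by omega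
      rw [this, List.replicate_succ]
    have hlen : (src.take L).length = L := by simp; omega
    simp only [List.foldl_cons, List.foldl_nil, hrep]
    have hset : ∀ Q : List Int, Q.length = L →
        (Q ++ (0:Int) :: List.replicate (N-(L+1)) 0).set L (src.getD L 0)
          = Q ++ src.getD L 0 :: List.replicate (N-(L+1)) 0 := by
      intro Q hQ; rw [← hQ]; simp
    rw [hset _ hlen]
    have htake : src.take (L+1) = src.take L ++ [src.getD L 0] := by
      rw [List.take_add_one, List.getElem?_eq_getElem (by omega : L < src.length),
          List.getD_eq_getElem _ _ (by omega : L < src.length)]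
      rfl
    rw [htake, List.append_assoc]
    simp

-- inner FIR loop: accumulate into slot n
lemma innerFIR (b1 x : List Int) (n : Nat) (P zs : List Int) (hP : P.length = n)
    (ks : List Nat) : ∀ c : Int,
    ks.foldl (fun y k => y.set n (y.getD n 0 + b1.getD k 0 * x.getD (n-k) 0)) (P ++ c :: zs)
      = P ++ (c + (ks.map (fun k => b1.getD k 0 * x.getD (n-k) 0)).sum) :: zs := by
  induction ks with
  | nil => intro c; simp
  | cons k ks ih =>
    intro c
    have hget : (P ++ c :: zs).getD n 0 = c := by rw [← hP]; simp
    have hset : ∀ v : Int, (P ++ c :: zs).set n v = P ++ v :: zs := by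
      intro v; rw [← hP]; simp
    simp only [List.foldl_cons, hget, hset, ih]
    rw [List.map_cons, List.sum_cons, ← add_assoc]

-- inner IIR loop body of A (as a named function so lemmas can mention it)
def stepA (a1 b1 x : List Int) (n : Nat) (st : Int × Int × List Int) (k : Nat) :
    Int × Int × List Int :=
  let t1 := st.1 - a1.getD k 0 * st.2.2.getD (n-k) 0
  let t2 := st.2.1 + b1.getD k 0 * x.getD (n-k) 0
  (t1, t2, st.2.2.set n (t1 + t2))

-- inner IIR loop after the k = 0 step: all reads hit the settled prefix P
lemma innerIIR (a1 b1 x : List Int) (n : Nat) (P zs : List Int) (hP : P.length = n)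
    (ks : List Nat) (hks : ∀ k ∈ ks, 1 ≤ k ∧ k ≤ n) : ∀ t1 t2 : Int,
    ks.foldl (stepA a1 b1 x n) (t1, t2, P ++ (t1 + t2) :: zs)
      = (t1 - (ks.map (fun k => a1.getD k 0 * P.getD (n-k) 0)).sum,
         t2 + (ks.map (fun k => b1.getD k 0 * x.getD (n-k) 0)).sum,
         P ++ ((t1 - (ks.map (fun k => a1.getD k 0 * P.getD (n-k) 0)).sum)
               + (t2 + (ks.map (fun k => b1.getD k 0 * x.getD (n-k) 0)).sum)) :: zs) := by
  induction ks with
  | nil => intro t1 t2; simp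
  | cons k ks ih =>
    intro t1 t2
    obtain ⟨hk1, hkn⟩ := hks k (by simp)
    have hread : (P ++ (t1 + t2) :: zs).getD (n-k) 0 = P.getD (n-k) 0 :=
      List.getD_append _ _ 0 _ (by omega)
    have hset : ∀ v : Int, (P ++ (t1 + t2) :: zs).set n v = P ++ v :: zs := by
      intro v; rw [← hP]; simp
    simp only [List.foldl_cons, stepA, hread, hset]
    rw [ih (fun k hk => hks k (by simp [hk]))]
    simp only [List.map_cons, List.sum_cons]
    refine Prod.ext (by ring) (Prod.ext (by ring) ?_)
    simp only
    congr 1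
    congr 1
    ring

-- list sums over mapped ranges are Finset sums
lemma listsum_range (f : Nat → Int) (m : Nat) :
    ((List.range m).map f).sum = ∑ k ∈ Finset.range m, f k := rfl

-- one full inner pass of A's IIR loop produces the yref entry
lemma innerIIR_full (a1 b1 x : List Int) (n : Nat) (P zs : List Int) (hP : P.length = n) :
    ((List.range (n+1)).foldl (stepA a1 b1 x n) ((0:Int), (0:Int), P ++ (0:Int) :: zs)).2.2
      = P ++ (fB b1 x n - ∑ k ∈ Finset.Ico 1 (n+1), a1.getD k 0 * P.getD (n-k) 0) :: zs := by
  rw [List.range_succ_eq_map]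
  have hread : (P ++ (0:Int) :: zs).getD (n-0) 0 = 0 := by
    rw [← hP]; simp
  have hset : ∀ v : Int, (P ++ (0:Int) :: zs).set n v = P ++ v :: zs := by
    intro v; rw [← hP]; simp
  simp only [List.foldl_cons, stepA, hread, hset]
  rw [innerIIR a1 b1 x n P zs hP _
      (by intro k hk; simp only [List.mem_map, List.mem_range] at hk; omega)]
  have hS1 : ((List.map Nat.succ (List.range n)).map
        (fun k => a1.getD k 0 * P.getD (n-k) 0)).sum
      = ∑ k ∈ Finset.Ico 1 (n+1), a1.getD k 0 * P.getD (n-k) 0 := by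
    rw [List.map_map,
        listsum_range ((fun k => a1.getD k 0 * P.getD (n-k) 0) ∘ Nat.succ),
        Finset.sum_Ico_eq_sum_range]
    simp [Function.comp, Nat.succ_eq_add_one, Nat.add_comm 1]
  have hS2 : ((List.map Nat.succ (List.range n)).map
        (fun k => b1.getD k 0 * x.getD (n-k) 0)).sum
      = ∑ k ∈ Finset.Ico 1 (n+1), b1.getD k 0 * x.getD (n-k) 0 := by
    rw [List.map_map,
        listsum_range ((fun k => b1.getD k 0 * x.getD (n-k) 0) ∘ Nat.succ),
        Finset.sum_Ico_eq_sum_range]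
    simp [Function.comp, Nat.succ_eq_add_one, Nat.add_comm 1]
  have hfB : fB b1 x n = b1.getD 0 0 * x.getD (n-0) 0
      + ∑ k ∈ Finset.Ico 1 (n+1), b1.getD k 0 * x.getD (n-k) 0 := by
    rw [fB, Finset.range_eq_Ico, Finset.sum_eq_sum_Ico_succ_bot (by omega)]
  rw [hS1, hS2]
  have hval : ((0:Int) - a1.getD 0 0 * 0
        - ∑ k ∈ Finset.Ico 1 (n+1), a1.getD k 0 * P.getD (n-k) 0)
      + ((0:Int) + b1.getD 0 0 * x.getD (n-0) 0
        + ∑ k ∈ Finset.Ico 1 (n+1), b1.getD k 0 * x.getD (n-k) 0)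
      = fB b1 x n - ∑ k ∈ Finset.Ico 1 (n+1), a1.getD k 0 * P.getD (n-k) 0 := by
    rw [hfB]; ring
  rw [hval]

-- A's outer IIR loop maintains: y = yref prefix ++ zeros
lemma outerA_IIR (a1 b1 x : List Int) : ∀ m, m ≤ x.length →
    (List.range m).foldl (fun y n =>
        ((List.range (n+1)).foldl (stepA a1 b1 x n) ((0:Int), (0:Int), y)).2.2)
      (List.replicate x.length 0)
      = yref a1 b1 x m ++ List.replicate (x.length - m) 0 := by
  intro m
  induction m with
  | zero => intro _; simp [yref]
  | succ m ih =>
    intro hm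
    rw [List.range_succ, List.foldl_append, ih (by omega)]
    simp only [List.foldl_cons, List.foldl_nil]
    have hrep : List.replicate (x.length - m) (0:Int)
        = (0:Int) :: List.replicate (x.length - (m+1)) 0 := by
      have : x.length - m = (x.length - (m+1)) + 1 := by omega
      rw [this, List.replicate_succ]
    rw [hrep, innerIIR_full a1 b1 x m _ _ (yref_length a1 b1 x m)]
    simp [yref, List.append_assoc]

-- A's outer FIR loop: y = list of convolution sums ++ zeros
lemma outerA_FIR (b1 x : List Int) : ∀ m, m ≤ x.length →
    (List.range m).foldl (fun y n =>
        (List.range (n+1)).foldl (fun y k =>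
          y.set n (y.getD n 0 + b1.getD k 0 * x.getD (n-k) 0)) y)
      (List.replicate x.length 0)
      = (List.range m).map (fB b1 x) ++ List.replicate (x.length - m) 0 := by
  intro m
  induction m with
  | zero => intro _; simp
  | succ m ih =>
    intro hm
    rw [List.range_succ, List.foldl_append, ih (by omega)]
    simp only [List.foldl_cons, List.foldl_nil]
    have hrep : List.replicate (x.length - m) (0:Int)
        = (0:Int) :: List.replicate (x.length - (m+1)) 0 := by
      have : x.length - m = (x.length - (m+1)) + 1 := by omega
      rw [this, List.replicate_succ]
    rw [hrep, innerFIR b1 x m _ _ (by simp) _ 0]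
    rw [List.range_succ (n := m), List.map_append]
    simp [listsum_range, fB, Finset.sum_range_succ]

-- sums with coefficients read through getD are insensitive to padding
lemma fB_pad (b x : List Int) (m n : Nat) : fB (b ++ List.replicate m 0) x n = fB b x n := by
  unfold fB; exact Finset.sum_congr rfl (fun k _ => by rw [padded_getD])

lemma yref_pad (a b x : List Int) (ma mb : Nat) : ∀ n,
    yref (a ++ List.replicate ma 0) (b ++ List.replicate mb 0) x n = yref a b x n := by
  intro n
  induction n with
  | zero => rfl
  | succ n ih => simp only [yref, ih, fB_pad, padded_getD]

-- B's feedforward entry equals the full convolution sum (extra terms read 0 via getD)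
lemma vEntry (b x : List Int) (n : Nat) :
    (List.range (min (n+1) b.length)).foldl
        (fun s k => s + b.getD k 0 * x.getD (n-k) 0) 0 = fB b x n := by
  rw [PySem.List.foldl_add _ (fun k => b.getD k 0 * x.getD (n-k) 0) 0, zero_add,
      listsum_range, fB]
  refine Finset.sum_subset ?_ ?_
  · intro k hk; simp only [Finset.mem_range] at hk ⊢; omega
  · intro k hk hk2
    simp only [Finset.mem_range] at hk hk2
    rw [List.getD_eq_default _ _ (by omega), zero_mul]

-- B's feedback sum equals the full Ico sum
lemma bsum_feedback (a : List Int) (P : List Int) (n : Nat) (hP : P.length = n) :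
    (List.range' 1 (min (n+1) a.length - 1)).foldl
        (fun s k => s + a.getD k 0 * P.getD (n-k) 0) 0
      = ∑ k ∈ Finset.Ico 1 (n+1), a.getD k 0 * P.getD (n-k) 0 := by
  rw [PySem.List.foldl_add _ (fun k => a.getD k 0 * P.getD (n-k) 0) 0, zero_add,
      List.range'_eq_map_range, List.map_map]
  rw [listsum_range ((fun k => a.getD k 0 * P.getD (n-k) 0) ∘ (1 + ·)),
      Finset.sum_Ico_eq_sum_range]
  simp only [Function.comp_apply]
  refine Finset.sum_subset ?_ ?_
  · intro k hk; simp only [Finset.mem_range] at hk ⊢; omega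
  · intro k hk hk2
    simp only [Finset.mem_range] at hk hk2
    rw [List.getD_eq_default _ _ (by omega), zero_mul]

-- B's feedback pass builds exactly yref
lemma altB_IIR (a b x : List Int) : ∀ m, m ≤ x.length →
    (List.range m).foldl (fun y n =>
        y ++ [((List.range x.length).map (fun n =>
            (List.range (min (n+1) b.length)).foldl
              (fun s k => s + b.getD k 0 * x.getD (n-k) 0) 0)).getD n 0
          - (List.range' 1 (min (n+1) a.length - 1)).foldl
              (fun s k => s + a.getD k 0 * y.getD (n-k) 0) 0]) []
      = yref a b x m := by
  intro m
  induction m with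
  | zero => intro _; rfl
  | succ m ih =>
    intro hm
    rw [List.range_succ, List.foldl_append, ih (by omega)]
    simp only [List.foldl_cons, List.foldl_nil]
    have hv : ((List.range x.length).map (fun n =>
        (List.range (min (n+1) b.length)).foldl
          (fun s k => s + b.getD k 0 * x.getD (n-k) 0) 0)).getD m 0
        = fB b x m := by
      rw [List.getD_eq_getElem _ _ (by simpa using by omega : m < _)]
      simp only [List.getElem_map, List.getElem_range]
      exact vEntry b x m
    rw [hv, bsum_feedback a _ m (yref_length a b x m)]
    simp [yref]

-- ===== VERDICT (by name: the statement is the Claim_ definition above) =====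
theorem diff_eqn_spec : Claim_equal_diff_eqn := by
  intro b a x _ hpre
  obtain ⟨hb, ha⟩ := hpre
  unfold Spec_diff_eqn diff_eqn diff_eqn_alt
  simp only
  by_cases h1 : a.length = 1
  · simp only [h1, if_true]
    rw [copy_fold b x.length hb]
    rw [outerA_FIR _ x x.length (le_refl x.length)]
    simp only [Nat.sub_self, List.replicate_zero, List.append_nil]
    refine (List.map_eq_map_iff.mpr ?_).symm
    intro n hn
    rw [vEntry, fB_pad]
  · have ha' : a.length ≤ x.length := ha.resolve_left h1
    simp only [if_neg h1]
    rw [copy_fold a x.length ha', copy_fold b x.length hb]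
    have hA := outerA_IIR (a ++ List.replicate (x.length - a.length) 0)
        (b ++ List.replicate (x.length - b.length) 0) x x.length (le_refl _)
    simp only [Nat.sub_self, List.replicate_zero, List.append_nil] at hA
    rw [show (fun y n =>
        ((List.range (n+1)).foldl (stepA (a ++ List.replicate (x.length - a.length) 0)
            (b ++ List.replicate (x.length - b.length) 0) x n) ((0:Int), (0:Int), y)).2.2)
        = (fun (y : List Int) n =>
        ((List.range (n+1)).foldl (fun (st : Int × Int × List Int) k =>
          let t1 := st.1 - (a ++ List.replicate (x.length - a.length) 0).getD k 0 * st.2.2.getD (n-k) 0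
          let t2 := st.2.1 + (b ++ List.replicate (x.length - b.length) 0).getD k 0 * x.getD (n-k) 0
          (t1, t2, st.2.2.set n (t1 + t2))) ((0:Int), (0:Int), y)).2.2) from rfl] at hA
    rw [hA, yref_pad]
    exact (altB_IIR a b x x.length (le_refl _)).symm
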